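-- pv_equiv track=rewrite | github.com/Chen-Xuying/ParaMA2_revise_xuying_v1 | evalsegpoint.py | __get_seg_morphemes
-- ===== SOURCE A (Python) =====
-- def __get_seg_morphemes(seg):
--     seg_morphemes = []
--     sIndx = 0
--     for i in range(len(seg)):
--         eIndx = sIndx + len(seg[i])
--         seg_morphemes.append((sIndx, eIndx))
--         sIndx = eIndx
--     return seg_morphemes
-- ===== SOURCE B (Python) =====
-- def __get_seg_morphemes(seg):
--     # Divide and conquer: spans of each half are computed independently
--     # (each as if it started at 0); the right half's spans are then shifted
--     # by the left half's total length. No running start index is maintained.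
--     if not seg:
--         return []
--     if len(seg) == 1:
--         return [(0, len(seg[0]))]
--     mid = len(seg) // 2
--     left = __get_seg_morphemes(seg[:mid])
--     right = __get_seg_morphemes(seg[mid:])
--     off = left[-1][1]
--     return left + [(a + off, b + off) for a, b in right]
-- ===== Notes on version B (the rewrite author's own statement) =====
-- stated objective: alternative
-- what changed: B replaces A's single left-to-right loop with a running start index by a divide-and-conquer: it splits the list in half, computes each half's spans independently as if starting at 0, and merges by shifting the right half's spans by the left half's total length (read off the last left span).
import Mathlib
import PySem

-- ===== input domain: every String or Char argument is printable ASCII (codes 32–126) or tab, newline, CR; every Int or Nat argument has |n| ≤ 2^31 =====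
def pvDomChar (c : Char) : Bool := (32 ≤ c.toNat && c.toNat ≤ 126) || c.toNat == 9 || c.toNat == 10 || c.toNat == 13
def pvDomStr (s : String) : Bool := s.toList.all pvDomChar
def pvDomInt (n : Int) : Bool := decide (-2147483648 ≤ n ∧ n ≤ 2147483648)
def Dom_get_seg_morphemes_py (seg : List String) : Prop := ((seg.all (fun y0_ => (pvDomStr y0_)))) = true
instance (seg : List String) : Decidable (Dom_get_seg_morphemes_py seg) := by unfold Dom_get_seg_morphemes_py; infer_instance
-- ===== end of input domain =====

-- ===== PORT A =====
-- literal port of A: index loop over range(len(seg)) with a running start, appending (sIndx, eIndx)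
def get_seg_morphemes_py (seg : List String) : List (Int × Int) :=
  (PySem.List.pyRange 0 (seg.length : Int) 1).foldl
    (fun st i =>
      (st.1 ++ [(st.2, st.2 + PySem.Str.len (PySem.List.pyGetD seg i ""))],
       st.2 + PySem.Str.len (PySem.List.pyGetD seg i "")))
    (([] : List (Int × Int)), (0 : Int)) |>.1

-- ===== PORT B =====
-- port of B: divide and conquer — split at mid = len//2, solve halves, shift the right
-- half by the last left span's end. Python's left[-1][1] is rendered as getLastD (0,0)
-- (exact: left is nonempty here since mid ≥ 1, so the default is never taken).
def get_seg_morphemes_py_alt : List String → List (Int × Int)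
  | [] => []
  | [s] => [(0, PySem.Str.len s)]
  | a :: b :: rest =>
    let seg := a :: b :: rest
    let mid := seg.length / 2
    let left := get_seg_morphemes_py_alt (seg.take mid)
    let right := get_seg_morphemes_py_alt (seg.drop mid)
    let off := (left.getLastD (0, 0)).2
    left ++ right.map (fun p => (p.1 + off, p.2 + off))
termination_by seg => seg.length
decreasing_by all_goals simp; omega

-- ===== PRECONDITION & SPEC =====
def Spec_get_seg_morphemes_py (seg : List String) (out : List (Int × Int)) : Prop := out = get_seg_morphemes_py_alt seg
instance (seg : List String) (out : List (Int × Int)) : Decidable (Spec_get_seg_morphemes_py seg out) := by unfold Spec_get_seg_morphemes_py; infer_instance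

-- ===== CLAIM (what is proved, stated in full; the proofs are below) =====
def Claim_equal_get_seg_morphemes_py : Prop := ∀ (seg : List String), Dom_get_seg_morphemes_py seg → Spec_get_seg_morphemes_py seg (get_seg_morphemes_py seg)

-- ===== LEMMAS AND PROOFS =====
-- reference spans: A's loop result starting at offset t
def pvSpans (t : Int) : List String → List (Int × Int)
  | [] => []
  | s :: r => (t, t + PySem.Str.len s) :: pvSpans (t + PySem.Str.len s) r

theorem pvFoldA (seg : List String) (acc : List (Int × Int)) (t : Int) :
    (seg.foldl (fun st (x : String) =>
        (st.1 ++ [(st.2, st.2 + PySem.Str.len x)], st.2 + PySem.Str.len x)) (acc, t)).1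
      = acc ++ pvSpans t seg := by
  induction seg generalizing acc t with
  | nil => simp [pvSpans]
  | cons s r ih =>
    simp only [List.foldl]
    rw [ih]
    simp [pvSpans]

-- total length of the segments
def pvSumLen (l : List String) : Int := l.foldr (fun s t => PySem.Str.len s + t) 0

theorem pvSpansShift (seg : List String) (t : Int) :
    pvSpans t seg = (pvSpans 0 seg).map (fun p => (p.1 + t, p.2 + t)) := by
  induction seg generalizing t with
  | nil => simp [pvSpans]
  | cons s r ih =>
    simp only [pvSpans, List.map_cons]
    refine congrArg₂ _ (by simp [add_comm]) ?_
    rw [ih (t + PySem.Str.len s), ih (0 + PySem.Str.len s), List.map_map]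
    refine List.map_congr_left (fun p _ => ?_)
    simp [Function.comp]
    constructor <;> ring

theorem pvSpansAppend (l r : List String) (t : Int) :
    pvSpans t (l ++ r) = pvSpans t l ++ pvSpans (t + pvSumLen l) r := by
  induction l generalizing t with
  | nil => simp [pvSpans, pvSumLen]
  | cons s l' ih =>
    simp only [List.cons_append, pvSpans, pvSumLen, List.foldr] at *
    rw [ih (t + PySem.Str.len s), add_assoc]

theorem pvSpansLast (l : List String) (t : Int) (d : Int × Int) (h : l ≠ []) :
    ((pvSpans t l).getLastD d).2 = t + pvSumLen l := by
  induction l generalizing t d with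
  | nil => exact absurd rfl h
  | cons s r ih =>
    cases r with
    | nil => simp [pvSpans, pvSumLen]
    | cons s' r' =>
      simp only [pvSpans, pvSumLen, List.foldr, List.getLastD_cons]
      have := ih (t := t + PySem.Str.len s) (d := (t, t + PySem.Str.len s)) (by simp)
      simp only [pvSpans, pvSumLen, List.foldr, List.getLastD_cons] at this
      rw [this]; ring

theorem pvAltEq : ∀ n (seg : List String), seg.length ≤ n →
    get_seg_morphemes_py_alt seg = pvSpans 0 seg := by
  intro n
  induction n with
  | zero =>
    intro seg h
    have : seg = [] := List.eq_nil_of_length_eq_zero (Nat.le_zero.mp h)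
    subst this; simp [get_seg_morphemes_py_alt, pvSpans]
  | succ n ih =>
    intro seg h
    match seg with
    | [] => simp [get_seg_morphemes_py_alt, pvSpans]
    | [s] => simp [get_seg_morphemes_py_alt, pvSpans]
    | a :: b :: rest =>
      rw [get_seg_morphemes_py_alt]
      set L := a :: b :: rest with hL
      have hlen : 2 ≤ L.length := by simp [hL]
      set mid := L.length / 2 with hmid
      have hmid1 : 1 ≤ mid := by omega
      have hmidlt : mid < L.length := by omega
      have hLn : L.length ≤ n + 1 := by rw [hL]; exact h
      have h1 : (L.take mid).length ≤ n := by
        simp only [List.length_take]; omega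
      have h2 : (L.drop mid).length ≤ n := by
        simp only [List.length_drop]; omega
      rw [ih _ h1, ih _ h2]
      have htk : L.take mid ≠ [] := by
        intro hc
        have := congrArg List.length hc
        simp only [List.length_take, List.length_nil] at this; omega
      rw [pvSpansLast _ _ _ htk, zero_add]
      rw [← pvSpansShift]
      have := pvSpansAppend (L.take mid) (L.drop mid) 0
      simp only [List.take_append_drop, zero_add] at this
      rw [← this]

-- ===== VERDICT (by name: the statement is the Claim_ definition above) =====
theorem get_seg_morphemes_py_spec : Claim_equal_get_seg_morphemes_py := by
  intro seg _
  unfold Spec_get_seg_morphemes_py get_seg_morphemes_py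
  rw [PySem.List.foldl_pyRange_zero_pyGetD' seg ""
        (fun st (x : String) =>
          (st.1 ++ [(st.2, st.2 + PySem.Str.len x)], st.2 + PySem.Str.len x))
        (([] : List (Int × Int)), (0 : Int))]
  rw [pvFoldA seg [] 0, pvAltEq seg.length seg le_rfl]
  simp
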